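-- pv_equiv track=rewrite | github.com/MrHamdulay/csc3-capstone | examples/data/Assignment_4/khmnos002/ndom.py | ndom_multiply
-- ===== SOURCE A (Python) =====
-- def decimal_to_ndom(a):
--     div = a//6
--     rem = a%6
--     ndom = str(rem)
--     while div >0:
--         rem = div%6
--         div = div//6
--         ndom = str(rem) + ndom
--     return ndom
--
-- def ndom_multiply(a,b):
--     b = str(b)
--     a = str(a)
--     sum = 0
--     total = 0
--     x = len(a) -1
--     y = len(b) -1
--     for i in range(len(a)):
--         sum += int(a[i]) * 6**x
--         x -= 1
--     for i in range(len(b)):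
--         total += int(b[i]) * 6**y
--         y -= 1
--     product = decimal_to_ndom(sum*total)
--     return product
-- ===== SOURCE B (Python) =====
-- def _add_scaled(cs, x, rb):
--     # cs + x*rb, position-wise on little-endian coefficient lists
--     if not rb:
--         return cs
--     if not cs:
--         return [x * rb[0]] + _add_scaled([], x, rb[1:])
--     return [cs[0] + x * rb[0]] + _add_scaled(cs[1:], x, rb[1:])
--
-- def ndom_multiply(a, b):
--     # schoolbook long multiplication directly in base 6 (no decimal round-trip)
--     rb = list(reversed([int(c) for c in str(b)]))  # b's digit values, little-endian
--     coeffs = []  # little-endian raw coefficients of the product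
--     for c in str(a):  # Horner over a's digits, most significant first
--         coeffs = _add_scaled([0] + coeffs, int(c), rb)
--     digits = []
--     carry = 0
--     for v in coeffs:  # single carry sweep, base 6
--         t = v + carry
--         digits.append(t % 6)
--         carry = t // 6
--     while carry > 0:
--         digits.append(carry % 6)
--         carry = carry // 6
--     while len(digits) > 1 and digits[-1] == 0:  # strip leading zeros (they sit at the end)
--         digits.pop()
--     return ''.join(str(d) for d in reversed(digits))
-- ===== Notes on version B (the rewrite author's own statement) =====
-- stated objective: alternative
-- what changed: B multiplies the two digit strings by schoolbook long multiplication directly in base 6 (Horner shift-and-add on little-endian coefficient lists followed by one carry sweep and a leading-zero strip), instead of A's round-trip through a decimal integer (positional powers of 6, integer multiply, repeated divmod-by-6 conversion back).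
import Mathlib
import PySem

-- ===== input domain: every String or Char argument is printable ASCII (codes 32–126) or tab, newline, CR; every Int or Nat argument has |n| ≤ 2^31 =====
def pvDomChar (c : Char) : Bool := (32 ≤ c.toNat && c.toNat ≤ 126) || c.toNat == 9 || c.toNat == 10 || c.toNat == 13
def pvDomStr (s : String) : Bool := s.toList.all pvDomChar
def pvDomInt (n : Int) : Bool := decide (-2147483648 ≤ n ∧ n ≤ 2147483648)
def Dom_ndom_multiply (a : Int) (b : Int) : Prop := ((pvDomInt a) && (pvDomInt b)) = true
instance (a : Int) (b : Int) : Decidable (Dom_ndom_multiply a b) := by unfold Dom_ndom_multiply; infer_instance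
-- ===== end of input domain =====

-- B replaces A's decimal round-trip (powers of 6, big multiply, divmod-by-6 loop) with schoolbook
-- long multiplication carried out directly in base 6; proved to return the same string on 0 ≤ a, 0 ≤ b.

-- ===== PORT A =====

-- int(c) for the one-character decimal digit strings str(n) consists of (exact there)
def charDigit (c : Char) : Int := (c.toNat : Int) - 48

-- the 'while div > 0' loop of decimal_to_ndom
def decimal_to_ndom_loop (dv : Int) (ndom : String) : String :=
  if 0 < dv then
    decimal_to_ndom_loop (PySem.Int.floordiv dv 6) (PySem.Int.toStr (PySem.Int.mod dv 6) ++ ndom)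
  else ndom
termination_by dv.toNat
decreasing_by
  simp only [PySem.Int.floordiv_eq_ediv_of_pos (by norm_num : (0:Int) < 6)]
  omega

def decimal_to_ndom (a : Int) : String :=
  decimal_to_ndom_loop (PySem.Int.floordiv a 6) (PySem.Int.toStr (PySem.Int.mod a 6))

def ndom_multiply (a : Int) (b : Int) : String :=
  let bs := PySem.Int.toStr b
  let as := PySem.Int.toStr a
  -- the two 'for i in range(len(..))' accumulation loops, state = (sum, x) resp. (total, y);
  -- 6 ** x ported as 6 ^ x.toNat (x stays ≥ 0 at every use in the loop)
  let sx :=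
    (PySem.List.pyRange 0 (PySem.Str.len as) 1).foldl
      (fun (st : Int × Int) i =>
        (st.1 + charDigit (PySem.List.pyGetD as.toList i ' ') * 6 ^ st.2.toNat, st.2 - 1))
      (0, PySem.Str.len as - 1)
  let ty :=
    (PySem.List.pyRange 0 (PySem.Str.len bs) 1).foldl
      (fun (st : Int × Int) i =>
        (st.1 + charDigit (PySem.List.pyGetD bs.toList i ' ') * 6 ^ st.2.toNat, st.2 - 1))
      (0, PySem.Str.len bs - 1)
  decimal_to_ndom (sx.1 * ty.1)

-- ===== PORT B =====

-- _add_scaled of Source B: cs + x*rb position-wise on little-endian coefficient lists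
def addScaled (cs : List Int) (x : Int) (rb : List Int) : List Int :=
  match rb, cs with
  | [], _ => cs
  | r :: rt, [] => x * r :: addScaled [] x rt
  | r :: rt, c :: ct => (c + x * r) :: addScaled ct x rt

-- the 'while carry > 0' loop
def carryLoop (c : Int) (ds : List Int) : List Int :=
  if 0 < c then carryLoop (PySem.Int.floordiv c 6) (ds ++ [PySem.Int.mod c 6]) else ds
termination_by c.toNat
decreasing_by
  simp only [PySem.Int.floordiv_eq_ediv_of_pos (by norm_num : (0:Int) < 6)]
  omega

-- the 'while len(digits) > 1 and digits[-1] == 0: digits.pop()' loop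
def stripLoop (ds : List Int) : List Int :=
  if 1 < ds.length ∧ ds.getLast? = some 0 then stripLoop ds.dropLast else ds
termination_by ds.length
decreasing_by
  simp_all [List.length_dropLast]
  omega

def ndom_multiply_alt (a : Int) (b : Int) : String :=
  let rb := ((PySem.Int.toStr b).toList.map charDigit).reverse  -- b's digits, little-endian
  let coeffs := (PySem.Int.toStr a).toList.foldl
      (fun cs c => addScaled (0 :: cs) (charDigit c) rb) []
  let dc := coeffs.foldl
      (fun (st : List Int × Int) v =>
        (st.1 ++ [PySem.Int.mod (v + st.2) 6], PySem.Int.floordiv (v + st.2) 6)) ([], 0)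
  let digits := stripLoop (carryLoop dc.2 dc.1)
  PySem.Str.join "" (digits.reverse.map (fun d => PySem.Int.toStr d))

-- ===== PRECONDITION & SPEC =====
-- A raises ValueError on any negative argument (int('-') on the sign character), so Pre_ excludes exactly those.
def Pre_ndom_multiply (a : Int) (b : Int) : Prop := 0 ≤ a ∧ 0 ≤ b
instance (a : Int) (b : Int) : Decidable (Pre_ndom_multiply a b) := by unfold Pre_ndom_multiply; infer_instance
def pvWitness_ndom_multiply : Int × Int := (78, 205)

def Spec_ndom_multiply (a : Int) (b : Int) (out : String) : Prop := out = ndom_multiply_alt a b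
instance (a : Int) (b : Int) (out : String) : Decidable (Spec_ndom_multiply a b out) := by unfold Spec_ndom_multiply; infer_instance

-- ===== CLAIM (what is proved, stated in full; the proofs are below) =====
def Claim_equal_ndom_multiply : Prop := ∀ (a : Int) (b : Int), Dom_ndom_multiply a b → Pre_ndom_multiply a b → Spec_ndom_multiply a b (ndom_multiply a b)

-- ===== LEMMAS AND PROOFS =====

-- little-endian value of a coefficient list
def valLE : List Int → Int
  | [] => 0
  | d :: t => d + 6 * valLE t

-- big-endian (Horner) value, the quantity A's accumulation loops compute
def valBE (ds : List Int) : Int := ds.foldl (fun v d => v * 6 + d) 0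

-- canonical little-endian base-6 digits of v (empty for v ≤ 0)
def canon (v : Int) : List Int :=
  if 0 < v then PySem.Int.mod v 6 :: canon (PySem.Int.floordiv v 6) else []
termination_by v.toNat
decreasing_by
  simp only [PySem.Int.floordiv_eq_ediv_of_pos (by norm_num : (0:Int) < 6)]
  omega



-- value helpers: render, sweep
def render (ds : List Int) : String :=
  PySem.Str.join "" (ds.reverse.map (fun d => PySem.Int.toStr d))

-- trailing-zero stripper on little-endian lists, front-recursive proof companion of stripLoop
def stripF : List Int → List Int
  | [] => []
  | d :: t => if stripF t = [] ∧ d = 0 then [] else d :: stripF t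

-- ---------- arithmetic on digit lists ----------

theorem valLE_nonneg : ∀ (ds : List Int), (∀ d ∈ ds, 0 ≤ d) → 0 ≤ valLE ds := by
  intro ds h
  induction ds with
  | nil => simp [valLE]
  | cons d t ih =>
    have hd := h d (by simp)
    have ht := ih (fun x hx => h x (by simp [hx]))
    simp [valLE]; omega

theorem valLE_append (xs ys : List Int) :
    valLE (xs ++ ys) = valLE xs + 6 ^ xs.length * valLE ys := by
  induction xs with
  | nil => simp [valLE]
  | cons d t ih => simp [valLE, ih, pow_succ]; ring

theorem valBE_acc : ∀ (ds : List Int) (v : Int),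
    ds.foldl (fun v d => v * 6 + d) v = v * 6 ^ ds.length + valBE ds := by
  intro ds
  induction ds with
  | nil => intro v; simp [valBE]
  | cons d t ih =>
    intro v
    simp only [List.foldl_cons, List.length_cons]
    rw [ih, (by rw [valBE]; simp only [List.foldl_cons]; rw [ih] : valBE (d :: t) = (0 * 6 + d) * 6 ^ t.length + valBE t)]
    ring

theorem valBE_cons (d : Int) (t : List Int) :
    valBE (d :: t) = d * 6 ^ t.length + valBE t := by
  rw [valBE]; simp only [List.foldl_cons]; rw [valBE_acc]; ring

theorem valBE_reverse (l : List Int) : valBE l = valLE l.reverse := by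
  induction l with
  | nil => simp [valBE, valLE]
  | cons d t ih =>
    rw [valBE_cons, ih]
    simp only [List.reverse_cons]
    rw [valLE_append]
    simp [valLE]; ring

theorem valBE_nonneg (l : List Int) (h : ∀ d ∈ l, 0 ≤ d) : 0 ≤ valBE l := by
  rw [valBE_reverse]
  exact valLE_nonneg _ (fun d hd => h d (by simpa using hd))

-- ---------- A's accumulation loop ----------

theorem aLoop : ∀ (cs : List Char) (s : Int),
    cs.foldl (fun (st : Int × Int) c => (st.1 + charDigit c * 6 ^ st.2.toNat, st.2 - 1))
        (s, (cs.length : Int) - 1)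
      = (s + valBE (cs.map charDigit), -1) := by
  intro cs
  induction cs with
  | nil => intro s; simp [valBE]
  | cons c t ih =>
    intro s
    simp only [List.foldl_cons, List.length_cons]
    have h1 : ((t.length + 1 : Nat) : Int) - 1 = (t.length : Int) := by push_cast; ring
    rw [h1]
    have h2 : ((t.length : Int)).toNat = t.length := Int.toNat_natCast t.length
    rw [h2]
    rw [ih (s + charDigit c * 6 ^ t.length)]
    simp only [List.map_cons]
    rw [valBE_cons]
    simp only [List.length_map]
    ring_nf

-- ---------- addScaled and the coefficient loop ----------

theorem addScaled_val : ∀ (rb cs : List Int) (x : Int),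
    valLE (addScaled cs x rb) = valLE cs + x * valLE rb := by
  intro rb
  induction rb with
  | nil => intro cs x; cases cs <;> simp [addScaled, valLE]
  | cons r rt ih =>
    intro cs x
    cases cs with
    | nil => simp [addScaled, valLE, ih]; ring
    | cons c ct => simp [addScaled, valLE, ih]; ring

theorem addScaled_mem : ∀ (rb cs : List Int) (x : Int),
    (∀ d ∈ cs, 0 ≤ d) → 0 ≤ x → (∀ d ∈ rb, 0 ≤ d) →
    ∀ d ∈ addScaled cs x rb, 0 ≤ d := by
  intro rb
  induction rb with
  | nil => intro cs x hcs _ _ d hd; cases cs <;> exact hcs d hd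
  | cons r rt ih =>
    intro cs x hcs hx hrb d hd
    have hr : 0 ≤ r := hrb r (by simp)
    have hrt : ∀ e ∈ rt, 0 ≤ e := fun e he => hrb e (by simp [he])
    cases cs with
    | nil =>
      simp only [addScaled, List.mem_cons] at hd
      rcases hd with h | h
      · subst h; positivity
      · exact ih [] x (by simp) hx hrt d h
    | cons c ct =>
      simp only [addScaled, List.mem_cons] at hd
      rcases hd with h | h
      · subst h
        have hc : 0 ≤ c := hcs c (by simp)
        have : 0 ≤ x * r := by positivity
        omega
      · exact ih ct x (fun e he => hcs e (by simp [he])) hx hrt d h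

theorem addScaled_cons_ne_nil (r : Int) (rt : List Int) (cs : List Int) (x c0 : Int) :
    addScaled (c0 :: cs) x (r :: rt) ≠ [] := by
  simp [addScaled]

theorem coeffs_val (rb : List Int) : ∀ (csl : List Char) (cs0 : List Int),
    valLE (csl.foldl (fun cs c => addScaled (0 :: cs) (charDigit c) rb) cs0)
      = valLE cs0 * 6 ^ csl.length + valBE (csl.map charDigit) * valLE rb := by
  intro csl
  induction csl with
  | nil => intro cs0; simp [valBE]
  | cons c t ih =>
    intro cs0
    simp only [List.foldl_cons, List.length_cons, List.map_cons]
    rw [ih, addScaled_val]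
    rw [valBE_cons]
    simp only [List.length_map, valLE]
    ring

theorem coeffs_nonneg (rb : List Int) (hrb : ∀ d ∈ rb, 0 ≤ d) :
    ∀ (csl : List Char) (cs0 : List Int), (∀ d ∈ cs0, 0 ≤ d) →
    (∀ c ∈ csl, 0 ≤ charDigit c) →
    ∀ v ∈ csl.foldl (fun cs c => addScaled (0 :: cs) (charDigit c) rb) cs0, 0 ≤ v := by
  intro csl
  induction csl with
  | nil => intro cs0 hcs0 _ v hv; exact hcs0 v hv
  | cons c t ih =>
    intro cs0 hcs0 hdig v hv
    simp only [List.foldl_cons] at hv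
    refine ih _ ?_ (fun e he => hdig e (by simp [he])) v hv
    refine addScaled_mem rb (0 :: cs0) (charDigit c) ?_ (hdig c (by simp)) hrb
    intro d hd
    rcases List.mem_cons.mp hd with h | h
    · subst h; norm_num
    · exact hcs0 d h

theorem coeffs_ne_nil (rb : List Int) (hrb : rb ≠ []) :
    ∀ (csl : List Char) (cs0 : List Int), (cs0 ≠ [] ∨ csl ≠ []) →
    csl.foldl (fun cs c => addScaled (0 :: cs) (charDigit c) rb) cs0 ≠ [] := by
  intro csl
  induction csl with
  | nil => intro cs0 h; simpa using h
  | cons c t ih =>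
    intro cs0 _
    simp only [List.foldl_cons]
    refine ih _ (Or.inl ?_)
    obtain ⟨r, rt, rfl⟩ := List.exists_cons_of_ne_nil hrb
    exact addScaled_cons_ne_nil r rt cs0 (charDigit c) 0

-- ---------- the carry sweep ----------

theorem sweep_spec : ∀ (xs ds : List Int) (c : Int),
    (let r := xs.foldl (fun (st : List Int × Int) v =>
        (st.1 ++ [PySem.Int.mod (v + st.2) 6], PySem.Int.floordiv (v + st.2) 6)) (ds, c)
     r.1.length = ds.length + xs.length ∧
     valLE r.1 + r.2 * 6 ^ r.1.length = valLE ds + (c + valLE xs) * 6 ^ ds.length ∧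
     (∀ d ∈ r.1, d ∈ ds ∨ (0 ≤ d ∧ d < 6)) ∧
     ((∀ v ∈ xs, 0 ≤ v) → 0 ≤ c → 0 ≤ r.2)) := by
  intro xs
  induction xs with
  | nil =>
    intro ds c
    refine ⟨by simp, by simp [valLE], fun d hd => Or.inl hd, fun _ hc => hc⟩
  | cons v t ih =>
    intro ds c
    simp only [List.foldl_cons]
    have h6 : (0:Int) < 6 := by norm_num
    set m := PySem.Int.mod (v + c) 6 with hm
    set q := PySem.Int.floordiv (v + c) 6 with hq
    have hmq : q * 6 + m = v + c := PySem.Int.floordiv_mul_add_mod (v + c) 6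
    have hm0 : 0 ≤ m := PySem.Int.mod_nonneg (v + c) h6
    have hm6 : m < 6 := PySem.Int.mod_lt (v + c) h6
    obtain ⟨hlen, hval, hmem, hsign⟩ := ih (ds ++ [m]) q
    refine ⟨?_, ?_, ?_, ?_⟩
    · rw [hlen]; simp; omega
    · rw [hval, valLE_append]
      simp only [valLE, List.length_append, List.length_cons, List.length_nil]
      linear_combination (6:Int) ^ ds.length * hmq
    · intro d hd
      rcases hmem d hd with h | h
      · rcases List.mem_append.mp h with h' | h'
        · exact Or.inl h'
        · simp only [List.mem_singleton] at h'; subst h'; exact Or.inr ⟨hm0, hm6⟩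
      · exact Or.inr h
    · intro hxs hc
      have hv : 0 ≤ v := hxs v (by simp)
      have hq0 : 0 ≤ q := by
        rw [hq, PySem.Int.floordiv_eq_ediv_of_pos h6]; omega
      exact hsign (fun e he => hxs e (by simp [he])) hq0

-- ---------- canonical base-6 digits ----------

theorem canon_pos (v : Int) (h : 0 < v) :
    canon v = PySem.Int.mod v 6 :: canon (PySem.Int.floordiv v 6) := by
  rw [canon, if_pos h]

theorem canon_nonpos (v : Int) (h : ¬ 0 < v) : canon v = [] := by
  rw [canon, if_neg h]

theorem canon_val : ∀ (v : Int), 0 ≤ v → valLE (canon v) = v := by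
  intro v
  fun_induction canon v with
  | case1 v h ih =>
    intro _
    have h6 : (0:Int) < 6 := by norm_num
    have hd : 0 ≤ PySem.Int.floordiv v 6 := by
      rw [PySem.Int.floordiv_eq_ediv_of_pos h6]; omega
    have := PySem.Int.floordiv_mul_add_mod v 6
    simp only [valLE, ih hd]
    omega
  | case2 v h => intro h2; simp [valLE]; omega

theorem canon_mem : ∀ (v : Int), ∀ d ∈ canon v, 0 ≤ d ∧ d < 6 := by
  intro v
  fun_induction canon v with
  | case1 v h ih =>
    intro d hd
    have h6 : (0:Int) < 6 := by norm_num
    rcases List.mem_cons.mp hd with h' | h'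
    · subst h'; exact ⟨PySem.Int.mod_nonneg v h6, PySem.Int.mod_lt v h6⟩
    · exact ih d h'
  | case2 v h => intro d hd; simp at hd

theorem canon_eq_nil_iff (v : Int) (h : 0 ≤ v) : canon v = [] ↔ v = 0 := by
  constructor
  · intro hc
    by_contra hne
    have hv : 0 < v := by omega
    rw [canon_pos v hv] at hc
    simp at hc
  · intro hv; subst hv; exact canon_nonpos 0 (by omega)

theorem carryLoop_eq : ∀ (c : Int) (ds : List Int), carryLoop c ds = ds ++ canon c := by
  intro c ds
  fun_induction carryLoop c ds with
  | case1 c ds h ih =>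
    rw [ih, canon_pos c h]
    simp
  | case2 c ds h => rw [canon_nonpos c h]; simp

-- ---------- stripping trailing zeros ----------

theorem stripF_eq_canon : ∀ (D : List Int), (∀ d ∈ D, 0 ≤ d ∧ d < 6) →
    stripF D = canon (valLE D) := by
  intro D
  induction D with
  | nil => intro _; simp [stripF, valLE, canon_nonpos 0 (by omega)]
  | cons d t ih =>
    intro h
    obtain ⟨hd0, hd6⟩ := h d (by simp)
    have ht : ∀ e ∈ t, 0 ≤ e ∧ e < 6 := fun e he => h e (by simp [he])
    have hV : 0 ≤ valLE t := valLE_nonneg t (fun e he => (ht e he).1)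
    have hrec := ih ht
    simp only [valLE, stripF, hrec]
    by_cases hz : d + 6 * valLE t = 0
    · have hd : d = 0 := by omega
      have hVz : valLE t = 0 := by omega
      rw [if_pos ⟨by rw [hVz]; exact canon_nonpos 0 (by omega), hd⟩]
      rw [hz, canon_nonpos 0 (by omega)]
    · have hpos : 0 < d + 6 * valLE t := by omega
      rw [canon_pos _ hpos]
      have h6 : (0:Int) < 6 := by norm_num
      have hmod : PySem.Int.mod (d + 6 * valLE t) 6 = d := by
        rw [PySem.Int.mod_eq_emod_of_pos h6]; omega
      have hdiv : PySem.Int.floordiv (d + 6 * valLE t) 6 = valLE t := by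
        rw [PySem.Int.floordiv_eq_ediv_of_pos h6]; omega
      rw [hmod, hdiv]
      rw [if_neg]
      rintro ⟨hnil, hdz⟩
      have : valLE t = 0 := (canon_eq_nil_iff _ hV).mp hnil
      omega

theorem stripF_concat_zero : ∀ (l : List Int), stripF (l ++ [0]) = stripF l := by
  intro l
  induction l with
  | nil => simp [stripF]
  | cons d t ih => simp only [List.cons_append, stripF, ih]

theorem stripF_concat_nonzero : ∀ (l : List Int) (d : Int), d ≠ 0 → stripF (l ++ [d]) = l ++ [d] := by
  intro l d hd
  induction l with
  | nil => simp [stripF, hd]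
  | cons e t ih =>
    simp only [List.cons_append, stripF, ih]
    rw [if_neg]
    rintro ⟨hnil, _⟩
    exact (List.append_ne_nil_of_right_ne_nil t (by simp)) hnil

theorem stripLoop_eq : ∀ (D : List Int), D ≠ [] →
    stripLoop D = if stripF D = [] then [0] else stripF D := by
  intro D
  induction D using List.reverseRecOn with
  | nil => intro h; simp at h
  | append_singleton xs x ih =>
    intro _
    rw [stripLoop]
    by_cases hx : x = 0
    · subst hx
      cases xs with
      | nil =>
        rw [if_neg (by simp)]
        simp [stripF]
      | cons y ys =>
        rw [if_pos ⟨by simp, by rw [List.getLast?_concat]⟩]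
        rw [List.dropLast_concat]
        rw [ih (by simp)]
        rw [stripF_concat_zero]
    · rw [if_neg (by rintro ⟨-, h2⟩; rw [List.getLast?_concat] at h2; exact hx (by simpa using h2))]
      rw [stripF_concat_nonzero xs x hx]
      rw [if_neg (by simp)]

-- ---------- string rendering ----------

theorem join_nil_flatten : ∀ (ls : List (List Char)), PySem.Chars.join [] ls = ls.flatten := by
  intro ls
  induction ls with
  | nil => rfl
  | cons x xs ih => cases xs <;> simp_all [PySem.Chars.join, List.intercalate]

theorem render_toList (ds : List Int) :
    (render ds).toList = ((ds.reverse.map (fun d => PySem.Int.toStr d)).map String.toList).flatten := by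
  simp [render, PySem.Str.join, join_nil_flatten]

theorem render_nil : render [] = "" := by
  rfl

theorem render_cons (m : Int) (l : List Int) :
    render (m :: l) = render l ++ PySem.Int.toStr m := by
  apply String.toList_inj.mp
  rw [render_toList]
  simp only [List.reverse_cons, List.map_append, List.flatten_append]
  rw [String.toList_append, render_toList]
  simp

-- ---------- decimal_to_ndom produces render ∘ canon ----------

theorem d2nLoop_eq : ∀ (dv : Int) (s : String),
    decimal_to_ndom_loop dv s = render (canon dv) ++ s := by
  intro dv s
  fun_induction decimal_to_ndom_loop dv s with
  | case1 dv s h ih =>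
    rw [ih, canon_pos dv h, render_cons, String.append_assoc]
  | case2 dv s h =>
    rw [canon_nonpos dv h, render_nil, String.empty_append]

theorem decimal_to_ndom_eq (a : Int) :
    decimal_to_ndom a =
      render (PySem.Int.mod a 6 :: canon (PySem.Int.floordiv a 6)) := by
  rw [decimal_to_ndom, d2nLoop_eq, render_cons]

-- ---------- digit characters of str(n) ----------

theorem toChars_digit_nonneg (n : Int) (h : 0 ≤ n) :
    ∀ c ∈ PySem.Int.toChars n, 0 ≤ charDigit c := by
  intro c hc
  unfold PySem.Int.toChars at hc
  rw [if_neg (by omega)] at hc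
  have hd := Nat.isDigit_of_mem_toDigits (by norm_num) (by norm_num) hc
  simp only [Char.isDigit, decide_eq_true_eq, Bool.and_eq_true, ge_iff_le] at hd
  obtain ⟨h1, _⟩ := hd
  have a1 : ('0'.val : UInt32).toNat ≤ c.val.toNat := UInt32.le_iff_toNat_le.mp h1
  have e : c.toNat = c.val.toNat := rfl
  have e0 : ('0'.val : UInt32).toNat = 48 := rfl
  unfold charDigit
  omega

theorem toChars_ne_nil (n : Int) : PySem.Int.toChars n ≠ [] := by
  unfold PySem.Int.toChars
  split_ifs
  · simp
  · exact List.ne_nil_of_length_pos Nat.length_toDigits_pos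

-- ---------- the two assembly lemmas ----------

theorem str_len_eq (s : String) : PySem.Str.len s = PySem.List.len s.toList := by
  simp [PySem.Str.len_eq, PySem.List.len]

theorem a_eq_render (a b : Int) :
    ndom_multiply a b =
      render (PySem.Int.mod (valBE ((PySem.Int.toStr a).toList.map charDigit) *
                             valBE ((PySem.Int.toStr b).toList.map charDigit)) 6 ::
              canon (PySem.Int.floordiv (valBE ((PySem.Int.toStr a).toList.map charDigit) *
                                         valBE ((PySem.Int.toStr b).toList.map charDigit)) 6)) := by
  simp only [ndom_multiply]
  rw [str_len_eq (PySem.Int.toStr a), str_len_eq (PySem.Int.toStr b)]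
  rw [PySem.List.foldl_pyRange_pyGetD (PySem.Int.toStr a).toList ' '
        (fun (st : Int × Int) c => (st.1 + charDigit c * 6 ^ st.2.toNat, st.2 - 1)) _ (le_refl 0)]
  rw [PySem.List.foldl_pyRange_pyGetD (PySem.Int.toStr b).toList ' '
        (fun (st : Int × Int) c => (st.1 + charDigit c * 6 ^ st.2.toNat, st.2 - 1)) _ (le_refl 0)]
  simp only [Int.toNat_zero, List.drop_zero, PySem.List.len]
  rw [aLoop, aLoop]
  simp only [zero_add]
  rw [decimal_to_ndom_eq]

theorem alt_eq_render (a b : Int) (ha : 0 ≤ a) (hb : 0 ≤ b) :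
    ndom_multiply_alt a b =
      render (PySem.Int.mod (valBE ((PySem.Int.toStr a).toList.map charDigit) *
                             valBE ((PySem.Int.toStr b).toList.map charDigit)) 6 ::
              canon (PySem.Int.floordiv (valBE ((PySem.Int.toStr a).toList.map charDigit) *
                                         valBE ((PySem.Int.toStr b).toList.map charDigit)) 6)) := by
  simp only [ndom_multiply_alt]
  set LA := (PySem.Int.toStr a).toList with hLA
  set LB := (PySem.Int.toStr b).toList with hLB
  set rb := (LB.map charDigit).reverse with hrb
  have hdigA : ∀ c ∈ LA, 0 ≤ charDigit c := by
    rw [hLA, PySem.Int.toList_toStr]; exact toChars_digit_nonneg a ha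
  have hdigB : ∀ c ∈ LB, 0 ≤ charDigit c := by
    rw [hLB, PySem.Int.toList_toStr]; exact toChars_digit_nonneg b hb
  have hLAne : LA ≠ [] := by
    rw [hLA, PySem.Int.toList_toStr]; exact toChars_ne_nil a
  have hLBne : LB ≠ [] := by
    rw [hLB, PySem.Int.toList_toStr]; exact toChars_ne_nil b
  have hrbmem : ∀ d ∈ rb, 0 ≤ d := by
    intro d hd
    rw [hrb, List.mem_reverse] at hd
    obtain ⟨c, hc, rfl⟩ := List.mem_map.mp hd
    exact hdigB c hc
  have hrbne : rb ≠ [] := by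
    rw [hrb]
    simp only [ne_eq, List.reverse_eq_nil_iff, List.map_eq_nil_iff]
    exact hLBne
  set coeffs := LA.foldl (fun cs c => addScaled (0 :: cs) (charDigit c) rb) [] with hcoeffs
  have hcne : coeffs ≠ [] := coeffs_ne_nil rb hrbne LA [] (Or.inr hLAne)
  have hcnn : ∀ v ∈ coeffs, 0 ≤ v := coeffs_nonneg rb hrbmem LA [] (by simp) hdigA
  have hcval : valLE coeffs = valBE (LA.map charDigit) * valBE (LB.map charDigit) := by
    rw [hcoeffs, coeffs_val]
    simp only [valLE, zero_mul, zero_add]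
    rw [hrb, ← valBE_reverse]
  obtain ⟨hlen, hval, hmem, hsign⟩ := sweep_spec coeffs [] 0
  set dcs := coeffs.foldl (fun (st : List Int × Int) v =>
      (st.1 ++ [PySem.Int.mod (v + st.2) 6], PySem.Int.floordiv (v + st.2) 6)) ([], 0) with hdcs
  simp only [valLE, List.length_nil, pow_zero, mul_one, zero_add, List.not_mem_nil, false_or] at hlen hval hmem
  have hsign' : 0 ≤ dcs.2 := hsign hcnn (le_refl 0)
  have hd1ne : dcs.1 ≠ [] := by
    apply List.ne_nil_of_length_pos
    rw [hlen]
    simpa using List.length_pos_iff.mpr hcne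
  rw [carryLoop_eq dcs.2 dcs.1]
  have hDmem : ∀ d ∈ dcs.1 ++ canon dcs.2, 0 ≤ d ∧ d < 6 := by
    intro d hd
    rcases List.mem_append.mp hd with h | h
    · exact hmem d h
    · exact canon_mem dcs.2 d h
  have hDval : valLE (dcs.1 ++ canon dcs.2)
      = valBE (LA.map charDigit) * valBE (LB.map charDigit) := by
    rw [valLE_append, canon_val dcs.2 hsign', mul_comm ((6:Int) ^ dcs.1.length) dcs.2]
    rw [hval, hcval]
  rw [stripLoop_eq _ (List.append_ne_nil_of_left_ne_nil hd1ne _)]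
  rw [stripF_eq_canon _ hDmem, hDval]
  set P := valBE (LA.map charDigit) * valBE (LB.map charDigit) with hP
  have hPnn : 0 ≤ P := by
    rw [hP]
    exact mul_nonneg (valBE_nonneg _ (by intro d hd; obtain ⟨c, hc, rfl⟩ := List.mem_map.mp hd; exact hdigA c hc))
      (valBE_nonneg _ (by intro d hd; obtain ⟨c, hc, rfl⟩ := List.mem_map.mp hd; exact hdigB c hc))
  by_cases hP0 : P = 0
  · rw [hP0]
    rw [canon_nonpos 0 (by omega), if_pos rfl]
    have hm : PySem.Int.mod 0 6 = 0 := by decide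
    have hf : PySem.Int.floordiv 0 6 = 0 := by decide
    rw [hm, hf, canon_nonpos 0 (by omega)]
    rfl
  · have hPpos : 0 < P := by omega
    rw [canon_pos P hPpos, if_neg (by simp)]
    rfl

theorem main_equiv (a b : Int) (ha : 0 ≤ a) (hb : 0 ≤ b) :
    ndom_multiply a b = ndom_multiply_alt a b := by
  rw [a_eq_render, alt_eq_render a b ha hb]

-- ===== VERDICT (by name: the statement is the Claim_ definition above) =====
theorem ndom_multiply_spec : Claim_equal_ndom_multiply := by
  intro a b _ hpre
  unfold Spec_ndom_multiply
  exact main_equiv a b hpre.1 hpre.2
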